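-- pv_equiv track=rewrite | github.com/Vikka/daily_coding_problem | problems/problem_2.py | solution_without_division
-- ===== SOURCE A (Python) =====
-- from math import prod
-- from typing import List
--
-- def solution_without_division(numbers: List[int]):
--     # result = [prod([x for x in numbers if n != x]) for n in numbers]
--     result = list()
--     for n in numbers:
--         tmp = list()
--         for x in numbers:
--             if x != n:
--                 tmp.append(x)
--         result.append(prod(tmp))
--     return result
-- ===== SOURCE B (Python) =====
-- def solution_without_division(numbers):
--     # One pass to group equal values into their product, then prefix/suffix
--     # products over the distinct-value group products: O(n + d) multiplications
--     # instead of A's O(n^2) scans.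
--     gprod = {}
--     for x in numbers:
--         gprod[x] = gprod.get(x, 1) * x
--     vals = list(gprod)
--     suf = _suffix_products([gprod[v] for v in vals])
--     ans = {}
--     pre = 1
--     for v, s in zip(vals, suf[1:]):
--         ans[v] = pre * s
--         pre = pre * gprod[v]
--     return [ans[n] for n in numbers]
--
-- def _suffix_products(gs):
--     suf = [1]
--     for g in reversed(gs):
--         suf.append(g * suf[-1])
--     suf.reverse()
--     return suf
-- ===== Notes on version B (the rewrite author's own statement) =====
-- stated objective: faster
-- what changed: Instead of rescanning and re-multiplying the whole list for every element, B groups equal values into their product in one dict pass and combines prefix/suffix products over the distinct-value group products, answering every element by one lookup.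
import Mathlib
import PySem

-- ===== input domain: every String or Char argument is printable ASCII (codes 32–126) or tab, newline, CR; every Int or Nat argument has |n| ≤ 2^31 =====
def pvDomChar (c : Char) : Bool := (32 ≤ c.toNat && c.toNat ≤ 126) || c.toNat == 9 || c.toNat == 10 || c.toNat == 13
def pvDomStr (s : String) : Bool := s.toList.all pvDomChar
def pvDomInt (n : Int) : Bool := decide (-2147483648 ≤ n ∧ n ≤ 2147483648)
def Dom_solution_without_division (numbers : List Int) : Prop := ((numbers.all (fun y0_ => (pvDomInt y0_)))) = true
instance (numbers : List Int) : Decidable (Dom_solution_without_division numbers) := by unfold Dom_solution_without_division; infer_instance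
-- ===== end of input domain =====

-- B replaces A's quadratic per-element rescans by one grouping pass (product of each
-- value's group) plus prefix/suffix products over the distinct-value group products.

-- ===== PORT A =====
-- for n in numbers: tmp = [x for x in numbers if x != n]; result.append(prod(tmp))
def solution_without_division (numbers : List Int) : List Int :=
  numbers.foldl
    (fun result n =>
      let tmp := numbers.foldl (fun tmp x => if x ≠ n then tmp ++ [x] else tmp) ([] : List Int)
      result ++ [tmp.prod])
    []

-- ===== PORT B =====
-- _suffix_products: python appends g*suf[-1] and reverses at the end; the reversed
-- list is built directly (its head is python's suf[-1]), so no final reverse is needed.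
def sufProds (gs : List Int) : List Int :=
  gs.reverse.foldl (fun suf g => (g * suf.headD 0) :: suf) [1]

def solution_without_division_alt (numbers : List Int) : List Int :=
  -- gprod[x] = gprod.get(x, 1) * x
  let gprod := numbers.foldl (fun d x => d.modify x 1 (· * x)) PySem.Dict.empty
  let vals := gprod.keys
  let suf := sufProds (vals.map (fun v => gprod.getD v 0))   -- gprod[v]: v is always a key
  -- for v, s in zip(vals, suf[1:]): ans[v] = pre * s; pre = pre * gprod[v]
  let st := (vals.zip (suf.drop 1)).foldl
      (fun (st : PySem.Dict Int Int × Int) p =>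
        (st.1.insert p.1 (st.2 * p.2), st.2 * gprod.getD p.1 0))
      (PySem.Dict.empty, 1)
  numbers.map (fun n => st.1.getD n 0)   -- ans[n]: n is always a key

-- ===== PRECONDITION & SPEC =====
def Spec_solution_without_division (numbers : List Int) (out : List Int) : Prop := out = solution_without_division_alt numbers
instance (numbers : List Int) (out : List Int) : Decidable (Spec_solution_without_division numbers out) := by unfold Spec_solution_without_division; infer_instance

-- ===== CLAIM (what is proved, stated in full; the proofs are below) =====
def Claim_equal_solution_without_division : Prop := ∀ (numbers : List Int), Dom_solution_without_division numbers → Spec_solution_without_division numbers (solution_without_division numbers)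

-- ===== LEMMAS AND PROOFS =====

-- A as a map of filtered products
theorem A_eq_map (numbers : List Int) :
    solution_without_division numbers
      = numbers.map (fun n => (numbers.filter (fun x => decide (x ≠ n))).prod) := by
  unfold solution_without_division
  rw [PySem.List.foldl_append_singleton_eq_map
    (f := fun n => (numbers.foldl (fun tmp x => if x ≠ n then tmp ++ [x] else tmp) ([] : List Int)).prod)]
  simp only [List.nil_append]
  refine List.map_congr_left fun n _ => ?_
  rw [PySem.List.foldl_append_ite_eq_filter (p := fun x => x ≠ n)]
  simp

-- the grouping dict: value at v is the product of v's occurrences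
theorem gfold_getD (L : List Int) (d : PySem.Dict Int Int) (v : Int) :
    (L.foldl (fun d x => d.modify x 1 (· * x)) d).getD v 1
      = d.getD v 1 * (L.filter (fun x => x == v)).prod := by
  induction L generalizing d with
  | nil => simp
  | cons x t ih =>
    simp only [List.foldl_cons, ih, List.filter_cons]
    rw [PySem.Dict.getD_modify]
    by_cases hxv : x = v
    · subst hxv
      simp [mul_assoc]
    · simp [Ne.symm hxv, (by simpa using hxv : (x == v) = false)]

theorem gfold_keys (L : List Int) :
    (L.foldl (fun d x => d.modify x 1 (· * x)) (PySem.Dict.empty : PySem.Dict Int Int)).keys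
      = PySem.Set.ofList L := by
  rw [PySem.Dict.keys_foldl_modify (f := fun _ x w => w * x)]
  simp [PySem.Dict.keys_empty, PySem.Set.update_nil_left]

-- a key of any dict has its stored value under every default
theorem getD_default_irrel (d : PySem.Dict Int Int) (v : Int) (h : v ∈ d.keys) (a b : Int) :
    d.getD v a = d.getD v b := by
  have hne : d.get? v ≠ none := by
    intro hc
    exact (PySem.Dict.get?_eq_none_iff_not_mem_keys d v).mp hc h
  obtain ⟨w, hw⟩ := Option.ne_none_iff_exists'.mp hne
  rw [PySem.Dict.getD_of_get?_eq_some d a hw, PySem.Dict.getD_of_get?_eq_some d b hw]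

-- suffix-product list: shape lemmas
theorem sufProds_cons (g : Int) (t : List Int) :
    sufProds (g :: t) = (g * (sufProds t).headD 0) :: sufProds t := by
  simp [sufProds, List.foldl_append]

theorem sufProds_headD (gs : List Int) : (sufProds gs).headD 0 = gs.prod := by
  induction gs with
  | nil => simp [sufProds]
  | cons g t ih => rw [sufProds_cons]; simp only [List.headD_cons, ih, List.prod_cons]

theorem sufProds_eq_cons (gs : List Int) :
    sufProds gs = gs.prod :: (sufProds gs).drop 1 := by
  cases gs with
  | nil => simp [sufProds]
  | cons g t => rw [sufProds_cons, sufProds_headD, List.prod_cons]; rfl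

-- the answer-building fold never changes a key it does not insert
theorem foldB_getD_not_mem (ps : List (Int × Int)) (gd : Int → Int)
    (ans : PySem.Dict Int Int) (pre n : Int) (h : ∀ p ∈ ps, p.1 ≠ n) :
    ((ps.foldl (fun st p => (st.1.insert p.1 (st.2 * p.2), st.2 * gd p.1)) (ans, pre)).1).getD n 0
      = ans.getD n 0 := by
  induction ps generalizing ans pre with
  | nil => rfl
  | cons p t ih =>
    simp only [List.foldl_cons]
    rw [ih _ _ (fun q hq => h q (List.mem_cons_of_mem _ hq))]
    rw [PySem.Dict.getD_insert]
    simp [Ne.symm (h p (List.mem_cons_self))]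

-- the answer dict: value at n is pre times the product of the other groups
theorem foldB_getD (vs : List Int) (gd : Int → Int) (ans : PySem.Dict Int Int)
    (pre n : Int) (hnd : vs.Nodup) (hn : n ∈ vs) :
    (((vs.zip ((sufProds (vs.map gd)).drop 1)).foldl
        (fun st p => (st.1.insert p.1 (st.2 * p.2), st.2 * gd p.1)) (ans, pre)).1).getD n 0
      = pre * ((vs.filter (fun v => decide (v ≠ n))).map gd).prod := by
  induction vs generalizing ans pre with
  | nil => cases hn
  | cons v t ih =>
    have hndt : t.Nodup := hnd.of_cons
    simp only [List.map_cons]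
    rw [sufProds_cons]
    simp only [List.drop_succ_cons, List.drop_zero]
    rw [sufProds_eq_cons (t.map gd)]
    simp only [List.zip_cons_cons, List.foldl_cons, List.filter_cons]
    by_cases hvn : v = n
    · subst hvn
      have hnt : v ∉ t := (List.nodup_cons.mp hnd).1
      rw [foldB_getD_not_mem _ _ _ _ _ (fun p hp => by
        intro hpv
        exact hnt (hpv ▸ (List.of_mem_zip hp).1))]
      rw [PySem.Dict.getD_insert]
      have ht : t.filter (fun x => decide (x ≠ v)) = t :=
        List.filter_eq_self.mpr (fun a ha => decide_eq_true (fun h => hnt (h ▸ ha)))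
      rw [if_pos rfl, ht, if_neg (by simp)]
    · rw [ih _ _ hndt (by cases hn with | head => exact absurd rfl hvn | tail _ h => exact h)]
      simp [hvn, mul_assoc]

-- products group by value: M.prod over distinct values covering M
theorem prod_if_mem (vs : List Int) (h : Int → Int) (a : Int)
    (hnd : vs.Nodup) (ha : a ∈ vs) :
    (vs.map (fun v => if a = v then a * h v else h v)).prod = a * (vs.map h).prod := by
  induction vs with
  | nil => cases ha
  | cons w r ih =>
    simp only [List.map_cons, List.prod_cons]
    by_cases hwa : w = a
    · subst hwa
      have hnr : w ∉ r := (List.nodup_cons.mp hnd).1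
      have : r.map (fun v => if w = v then w * h v else h v) = r.map h :=
        List.map_congr_left fun v hv => by
          have : w ≠ v := fun hc => hnr (hc ▸ hv)
          simp [this]
      simp [this, mul_assoc]
    · have har : a ∈ r := by cases ha with | head => exact absurd rfl hwa | tail _ hx => exact hx
      rw [if_neg (fun hc => hwa hc.symm), ih hnd.of_cons har]
      ring

theorem grouping (M vs : List Int) (hnd : vs.Nodup) (hsub : ∀ x ∈ M, x ∈ vs) :
    M.prod = (vs.map (fun v => (M.filter (fun x => x == v)).prod)).prod := by
  induction M with
  | nil => simp
  | cons a t ih =>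
    have hfun : (fun v => (((a :: t).filter (fun x => x == v)).prod))
        = fun v => if a = v then a * (t.filter (fun x => x == v)).prod
                   else (t.filter (fun x => x == v)).prod := by
      funext v
      by_cases hav : a = v <;> simp [hav]
    have ha : a ∈ vs := hsub a (by simp)
    have hsub' : ∀ x ∈ t, x ∈ vs := fun x hx => hsub x (by simp [hx])
    rw [List.prod_cons, hfun,
      prod_if_mem vs (fun v => (t.filter (fun x => x == v)).prod) a hnd ha, ← ih hsub']

-- ===== VERDICT (by name: the statement is the Claim_ definition above) =====
theorem solution_without_division_spec : Claim_equal_solution_without_division := by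
  intro numbers _
  unfold Spec_solution_without_division
  rw [A_eq_map]
  unfold solution_without_division_alt
  set gprod := numbers.foldl (fun d x => d.modify x 1 (· * x)) PySem.Dict.empty with hg
  have hkeys : gprod.keys = PySem.Set.ofList numbers := gfold_keys numbers
  have hnd : gprod.keys.Nodup := hkeys ▸ PySem.Set.nodup_ofList numbers
  have hmem : ∀ v, v ∈ gprod.keys ↔ v ∈ numbers := fun v => by
    rw [hkeys]; exact PySem.Set.mem_ofList numbers v
  have hgd : ∀ v ∈ gprod.keys, gprod.getD v 0 = (numbers.filter (fun x => x == v)).prod := by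
    intro v hv
    rw [getD_default_irrel gprod v hv 0 1, hg, gfold_getD]
    simp
  refine List.map_congr_left fun n hn => ?_
  rw [foldB_getD gprod.keys (fun v => gprod.getD v 0) PySem.Dict.empty 1 n hnd
    ((hmem n).mpr hn), one_mul]
  -- A's per-element product equals B's product over the other distinct-value groups
  rw [grouping (numbers.filter (fun x => decide (x ≠ n))) (gprod.keys.filter (fun v => decide (v ≠ n)))
      (hnd.filter _)
      (fun x hx => by
        have h1 := List.of_mem_filter hx
        have h2 := List.mem_of_mem_filter hx
        exact List.mem_filter.mpr ⟨(hmem x).mpr h2, h1⟩)]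
  refine congrArg List.prod (List.map_congr_left fun v hv => ?_)
  have hvn : v ≠ n := by simpa using List.of_mem_filter hv
  have hvk : v ∈ gprod.keys := List.mem_of_mem_filter hv
  rw [hgd v hvk]
  refine congrArg List.prod ?_
  rw [List.filter_filter]
  exact List.filter_congr fun x _ => by
    by_cases hx : x = v <;> simp [hx, hvn]
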